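-- pv_equiv track=rewrite | github.com/standanley/fixture | fixture/template_creation_utils.py | remove_repeated_timesteps
-- ===== SOURCE A (Python) =====
-- def remove_repeated_timesteps(t, h):
--     # issues with multiple repeated ts
--     t_norepeat, h_norepeat = [], []
--     tt_prev = float('nan')
--     for tt, hh in zip(t, h):
--         if tt != tt_prev:
--             t_norepeat.append(tt)
--             h_norepeat.append(hh)
--             tt_prev = tt
--         else:
--             # take last version
--             h_norepeat[-1] = hh
--     return t_norepeat, h_norepeat
-- ===== SOURCE B (Python) =====
-- def remove_repeated_timesteps(t, h):
--     # group runs of consecutive equal timestamps, keeping the last h of each run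
--     pairs = list(zip(t, h))
--     t_norepeat, h_norepeat = [], []
--     i, n = 0, len(pairs)
--     while i < n:
--         key = pairs[i][0]
--         j = i + 1
--         while j < n and pairs[j][0] == key:
--             j += 1
--         t_norepeat.append(key)
--         h_norepeat.append(pairs[j - 1][1])
--         i = j
--     return t_norepeat, h_norepeat
-- ===== Notes on version B (the rewrite author's own statement) =====
-- stated objective: alternative
-- what changed: Replaces the running tt_prev sentinel with overwrite-last accumulator by a run-based pass: scan each run of consecutive equal timestamps and emit its key with the run's last h.
import Mathlib
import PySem

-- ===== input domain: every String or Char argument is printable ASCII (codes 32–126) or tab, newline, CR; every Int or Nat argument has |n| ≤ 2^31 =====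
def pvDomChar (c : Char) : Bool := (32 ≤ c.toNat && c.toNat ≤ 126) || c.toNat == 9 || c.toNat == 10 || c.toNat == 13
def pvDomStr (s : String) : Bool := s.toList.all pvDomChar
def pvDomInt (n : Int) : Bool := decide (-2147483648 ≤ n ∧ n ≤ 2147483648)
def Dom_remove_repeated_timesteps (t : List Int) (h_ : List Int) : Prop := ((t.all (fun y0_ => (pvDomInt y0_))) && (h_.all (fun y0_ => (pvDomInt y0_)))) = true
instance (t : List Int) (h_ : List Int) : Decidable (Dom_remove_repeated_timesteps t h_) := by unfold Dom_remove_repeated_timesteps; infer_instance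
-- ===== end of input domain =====

-- B is an alternative run-based pass (group consecutive equal timestamps, keep the last h of each run); return value proved equal to A's.

-- ===== PORT A =====
-- h_norepeat[-1] = hh : overwrite the last element (only reached when h_norepeat is nonempty)
def pvSetLast (xs : List Int) (v : Int) : List Int :=
  match xs with
  | [] => []
  | [_] => [v]
  | x :: xs => x :: pvSetLast xs v

-- tt_prev starts as float('nan'); nan != tt holds for every int tt, modelled by Option Int with none = nan
def pvStepA (st : List Int × List Int × Option Int) (p : Int × Int) : List Int × List Int × Option Int :=
  match st with
  | (tn, hn, prev) =>
    if (match prev with | none => true | some p0 => p.1 != p0) then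
      (tn ++ [p.1], hn ++ [p.2], some p.1)
    else
      (tn, pvSetLast hn p.2, prev)

def remove_repeated_timesteps (t : List Int) (h_ : List Int) : List Int × List Int :=
  let st := (List.zip t h_).foldl pvStepA ([], [], none)
  (st.1, st.2.1)

-- ===== PORT B =====
def pvRuns : List (Int × Int) → List Int × List Int
  | [] => ([], [])
  | (a, b) :: rest =>
    let run := rest.takeWhile (fun p => p.1 == a)
    let rest' := rest.dropWhile (fun p => p.1 == a)
    let lastH := (((a, b) :: run).getLast (by simp)).2
    let (ts, hs) := pvRuns rest'
    (a :: ts, lastH :: hs)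
termination_by l => l.length
decreasing_by
  simp only [List.length_cons]
  exact Nat.lt_succ_of_le (List.length_dropWhile_le _ _)

def remove_repeated_timesteps_alt (t : List Int) (h_ : List Int) : List Int × List Int :=
  pvRuns (List.zip t h_)

-- ===== PRECONDITION & SPEC =====
def Spec_remove_repeated_timesteps (t : List Int) (h_ : List Int) (out : List Int × List Int) : Prop := out = remove_repeated_timesteps_alt t h_
instance (t : List Int) (h_ : List Int) (out : List Int × List Int) : Decidable (Spec_remove_repeated_timesteps t h_ out) := by unfold Spec_remove_repeated_timesteps; infer_instance

-- ===== CLAIM (what is proved, stated in full; the proofs are below) =====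
def Claim_equal_remove_repeated_timesteps : Prop := ∀ (t : List Int) (h_ : List Int), Dom_remove_repeated_timesteps t h_ → Spec_remove_repeated_timesteps t h_ (remove_repeated_timesteps t h_)

-- ===== LEMMAS AND PROOFS =====

theorem pvSetLast_append (hn : List Int) (v b : Int) :
    pvSetLast (hn ++ [v]) b = hn ++ [b] := by
  induction hn with
  | nil => rfl
  | cons x xs ih =>
    cases xs with
    | nil => simp [pvSetLast]
    | cons y ys => simpa [pvSetLast] using ih

theorem pvRuns_cons_same (p v b : Int) (z : List (Int × Int)) :
    pvRuns ((p, v) :: (p, b) :: z) = pvRuns ((p, b) :: z) := by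
  rw [pvRuns, pvRuns]
  simp

theorem foldA_run (z : List (Int × Int)) :
    ∀ (tn hn : List Int) (p v : Int),
    z.foldl pvStepA (tn ++ [p], hn ++ [v], some p) =
      (tn ++ (pvRuns ((p, v) :: z)).1, hn ++ (pvRuns ((p, v) :: z)).2,
        some (((p, v) :: z).getLast (by simp)).1) := by
  induction z with
  | nil => intro tn hn p v; simp [pvRuns]
  | cons q z ih =>
    intro tn hn p v
    obtain ⟨a, b⟩ := q
    by_cases hap : a = p
    · subst hap
      rw [pvRuns_cons_same]
      simp only [List.foldl_cons, pvStepA, bne_self_eq_false, Bool.false_eq_true,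
        if_false, pvSetLast_append]
      have := ih tn hn a b
      rw [this]
      congr 1
    · simp only [List.foldl_cons, pvStepA]
      rw [if_pos (by simp [bne, hap])]
      have := ih (tn ++ [p]) (hn ++ [v]) a b
      rw [this]
      conv_rhs => rw [pvRuns]
      simp [hap, List.getLast]

theorem remove_repeated_timesteps_eq (t h_ : List Int) :
    remove_repeated_timesteps t h_ = remove_repeated_timesteps_alt t h_ := by
  unfold remove_repeated_timesteps remove_repeated_timesteps_alt
  cases hz : List.zip t h_ with
  | nil => simp [pvRuns]
  | cons q z =>
    obtain ⟨p, v⟩ := q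
    simp only [List.foldl_cons, pvStepA, if_true]
    have := foldA_run z [] [] p v
    simp only [List.nil_append] at this
    simp only [List.nil_append, this]

-- ===== VERDICT (by name: the statement is the Claim_ definition above) =====
theorem remove_repeated_timesteps_spec : Claim_equal_remove_repeated_timesteps := by
  intro t h_ _
  unfold Spec_remove_repeated_timesteps
  exact remove_repeated_timesteps_eq t h_
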